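-- pv_equiv track=rewrite | github.com/awanmh/Aurix-engine | python-services/aurix/reporting/verdict_engine.py | _get_warning_recommendations
-- ===== SOURCE A (Python) =====
-- from typing import List
--
-- def _get_warning_recommendations(reasons: List[str]) -> List[str]:
--     """Get recommendations for warning conditions."""
--     recommendations = ["Continue monitoring closely"]
--
--     if any("Preservation" in r for r in reasons):
--         recommendations.append("Consider waiting for market conditions to improve")
--
--     if any("Grinding" in r for r in reasons):
--         recommendations.append("Capital efficiency may be declining")
--
--     if any("Win rate" in r for r in reasons):
--         recommendations.append("Review trade selection criteria")
--
--     if any("DECLINING" in r for r in reasons):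
--         recommendations.append("Trend deteriorating - watch for critical threshold")
--
--     return recommendations[:3]  # Limit to 3
-- ===== SOURCE B (Python) =====
-- # One pass over reasons computing all four keyword flags at once, then a
-- # table-driven build of the recommendation list (vs A's four separate any() scans).
-- def _get_warning_recommendations(reasons):
--     p = g = w = d = False
--     for r in reasons:
--         p = p or "Preservation" in r
--         g = g or "Grinding" in r
--         w = w or "Win rate" in r
--         d = d or "DECLINING" in r
--     recs = ["Continue monitoring closely"]
--     for hit, rec in ((p, "Consider waiting for market conditions to improve"),
--                      (g, "Capital efficiency may be declining"),
--                      (w, "Review trade selection criteria"),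
--                      (d, "Trend deteriorating - watch for critical threshold")):
--         if hit:
--             recs.append(rec)
--     return recs[:3]
-- ===== Notes on version B (the rewrite author's own statement) =====
-- stated objective: alternative
-- what changed: B scans the reasons list once, accumulating all four keyword flags in a single pass, then builds the output from a static (flag, recommendation) table, instead of A's four separate any() scans over the list.
import Mathlib
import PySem

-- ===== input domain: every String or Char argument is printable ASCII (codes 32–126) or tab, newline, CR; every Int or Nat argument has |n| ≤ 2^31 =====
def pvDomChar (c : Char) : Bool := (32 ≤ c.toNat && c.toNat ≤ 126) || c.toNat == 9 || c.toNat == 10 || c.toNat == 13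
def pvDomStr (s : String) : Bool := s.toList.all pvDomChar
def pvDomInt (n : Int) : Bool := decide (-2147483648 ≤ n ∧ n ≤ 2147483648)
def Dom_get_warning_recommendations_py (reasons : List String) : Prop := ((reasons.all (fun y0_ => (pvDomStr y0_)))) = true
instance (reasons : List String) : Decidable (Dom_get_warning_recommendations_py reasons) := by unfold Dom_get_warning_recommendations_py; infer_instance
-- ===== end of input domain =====

-- B changes the decomposition: one pass over `reasons` accumulating all four keyword
-- flags, then a table-driven build, instead of A's four separate any() scans (objective: alternative).

-- ===== PORT A =====
def get_warning_recommendations_py (reasons : List String) : List String :=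
  let recs := ["Continue monitoring closely"]
  let recs := if reasons.any (fun r => PySem.Str.isIn "Preservation" r)
              then recs ++ ["Consider waiting for market conditions to improve"] else recs
  let recs := if reasons.any (fun r => PySem.Str.isIn "Grinding" r)
              then recs ++ ["Capital efficiency may be declining"] else recs
  let recs := if reasons.any (fun r => PySem.Str.isIn "Win rate" r)
              then recs ++ ["Review trade selection criteria"] else recs
  let recs := if reasons.any (fun r => PySem.Str.isIn "DECLINING" r)
              then recs ++ ["Trend deteriorating - watch for critical threshold"] else recs
  PySem.List.slice recs none (some 3)

-- ===== PORT B =====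
def get_warning_recommendations_py_alt (reasons : List String) : List String :=
  let flags := reasons.foldl
    (fun (h : Bool × Bool × Bool × Bool) r =>
      (h.1 || PySem.Str.isIn "Preservation" r,
       h.2.1 || PySem.Str.isIn "Grinding" r,
       h.2.2.1 || PySem.Str.isIn "Win rate" r,
       h.2.2.2 || PySem.Str.isIn "DECLINING" r))
    (false, false, false, false)
  let recs := [(flags.1, "Consider waiting for market conditions to improve"),
               (flags.2.1, "Capital efficiency may be declining"),
               (flags.2.2.1, "Review trade selection criteria"),
               (flags.2.2.2, "Trend deteriorating - watch for critical threshold")].foldl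
    (fun acc hr => if hr.1 then acc ++ [hr.2] else acc) ["Continue monitoring closely"]
  PySem.List.slice recs none (some 3)

-- ===== PRECONDITION & SPEC =====
def Spec_get_warning_recommendations_py (reasons : List String) (out : List String) : Prop := out = get_warning_recommendations_py_alt reasons
instance (reasons : List String) (out : List String) : Decidable (Spec_get_warning_recommendations_py reasons out) := by unfold Spec_get_warning_recommendations_py; infer_instance

-- ===== CLAIM (what is proved, stated in full; the proofs are below) =====
def Claim_equal_get_warning_recommendations_py : Prop := ∀ (reasons : List String), Dom_get_warning_recommendations_py reasons → Spec_get_warning_recommendations_py reasons (get_warning_recommendations_py reasons)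

-- ===== LEMMAS AND PROOFS =====

-- B's single fold computes exactly the four any-scans A performs.
theorem pv_fold_flags (reasons : List String) (h : Bool × Bool × Bool × Bool) :
    reasons.foldl
      (fun (h : Bool × Bool × Bool × Bool) r =>
        (h.1 || PySem.Str.isIn "Preservation" r,
         h.2.1 || PySem.Str.isIn "Grinding" r,
         h.2.2.1 || PySem.Str.isIn "Win rate" r,
         h.2.2.2 || PySem.Str.isIn "DECLINING" r)) h =
    (h.1 || reasons.any (fun r => PySem.Str.isIn "Preservation" r),
     h.2.1 || reasons.any (fun r => PySem.Str.isIn "Grinding" r),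
     h.2.2.1 || reasons.any (fun r => PySem.Str.isIn "Win rate" r),
     h.2.2.2 || reasons.any (fun r => PySem.Str.isIn "DECLINING" r)) := by
  induction reasons generalizing h with
  | nil => simp
  | cons x xs ih => rw [List.foldl_cons, ih]; simp [Bool.or_assoc]

-- ===== VERDICT (by name: the statement is the Claim_ definition above) =====
theorem get_warning_recommendations_py_spec : Claim_equal_get_warning_recommendations_py := by
  intro reasons _
  unfold Spec_get_warning_recommendations_py get_warning_recommendations_py get_warning_recommendations_py_alt
  rw [pv_fold_flags]
  cases hp : reasons.any (fun r => PySem.Str.isIn "Preservation" r) <;>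
  cases hg : reasons.any (fun r => PySem.Str.isIn "Grinding" r) <;>
  cases hw : reasons.any (fun r => PySem.Str.isIn "Win rate" r) <;>
  cases hd : reasons.any (fun r => PySem.Str.isIn "DECLINING" r) <;>
  simp [List.foldl]
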